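-- pv_equiv track=rewrite | github.com/varuunnn/gitjenkins | factorial.py | func
-- ===== SOURCE A (Python) =====
-- def func(no):
--     f=1
--     m=1
--     for i in range(1,no+1):
--         f=f*i
--
--         if i%2==0:
--             m=m*i
--
--     return f,m
-- ===== SOURCE B (Python) =====
-- def func(no):
--     k = no // 2 if no > 0 else 0
--     p = 1
--     for i in range(1, k + 1):
--         p *= i
--     m = 2 ** k * p
--     f = p
--     for i in range(k + 1, no + 1):
--         f *= i
--     return f, m
-- ===== Notes on version B (the rewrite author's own statement) =====
-- stated objective: alternative
-- what changed: B drops the per-iteration parity test: it computes k = no//2, gets k! with one short loop, obtains the even product in closed form as 2**k * k!, and extends the same partial product from k+1 to no to get no!.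
import Mathlib
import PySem

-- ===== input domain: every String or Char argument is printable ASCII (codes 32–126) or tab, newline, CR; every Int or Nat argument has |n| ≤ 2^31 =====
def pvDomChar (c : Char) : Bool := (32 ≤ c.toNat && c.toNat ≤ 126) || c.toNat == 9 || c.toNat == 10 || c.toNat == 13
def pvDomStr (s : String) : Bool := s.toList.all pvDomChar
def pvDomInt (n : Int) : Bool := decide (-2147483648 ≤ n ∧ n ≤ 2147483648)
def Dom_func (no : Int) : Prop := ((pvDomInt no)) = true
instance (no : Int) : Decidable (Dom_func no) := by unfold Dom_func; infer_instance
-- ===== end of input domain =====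

-- B replaces A's per-iteration parity test by the closed form 2^k * k! (k = no//2) for the even
-- product and extends the same partial product k!·(k+1)⋯no to get no! — alternative decomposition.

-- ===== PORT A =====
def func (no : Int) : Int × Int :=
  let st := (PySem.List.pyRange 1 (no + 1) 1).foldl
    (fun (s : Int × Int) i => (s.1 * i, if PySem.Int.mod i 2 = 0 then s.2 * i else s.2)) (1, 1)
  st

-- ===== PORT B =====
def func_alt (no : Int) : Int × Int :=
  let k : Int := if no > 0 then PySem.Int.floordiv no 2 else 0
  let p : Int := (PySem.List.pyRange 1 (k + 1) 1).foldl (fun p i => p * i) 1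
  -- 2 ** k : here k ≥ 0 by construction, so the Nat exponent is exact
  let m : Int := 2 ^ k.toNat * p
  let f : Int := (PySem.List.pyRange (k + 1) (no + 1) 1).foldl (fun f i => f * i) p
  (f, m)

-- ===== PRECONDITION & SPEC =====
def Spec_func (no : Int) (out : Int × Int) : Prop := out = func_alt no
instance (no : Int) (out : Int × Int) : Decidable (Spec_func no out) := by unfold Spec_func; infer_instance

-- ===== CLAIM (what is proved, stated in full; the proofs are below) =====
def Claim_equal_func : Prop := ∀ (no : Int), Dom_func no → Spec_func no (func no)

-- ===== LEMMAS AND PROOFS =====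

-- A's loop computes (n!, 2^(n/2) · (n/2)!).
lemma loopA (n : Nat) :
    (PySem.List.pyRange 1 ((n : Int) + 1) 1).foldl
      (fun (s : Int × Int) i => (s.1 * i, if PySem.Int.mod i 2 = 0 then s.2 * i else s.2)) (1, 1)
    = ((n.factorial : Int), 2 ^ (n / 2) * ((n / 2).factorial : Int)) := by
  induction n with
  | zero =>
      rw [show ((0 : Nat) : Int) + 1 = 1 by norm_num, PySem.List.pyRange_one_eq_nil le_rfl]
      simp
  | succ n ih =>
      rw [show ((n + 1 : Nat) : Int) + 1 = ((n : Int) + 1) + 1 by push_cast; ring,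
          PySem.List.pyRange_one_succ_right (by omega), List.foldl_append, ih]
      simp only [List.foldl]
      have hmod : PySem.Int.mod ((n : Int) + 1) 2 = (((n + 1) % 2 : Nat) : Int) := by
        have := PySem.Int.mod_natCast (n + 1) 2
        push_cast at this ⊢; exact this
      rcases Nat.mod_two_eq_zero_or_one n with h | h
      · -- n even, n+1 odd: m unchanged
        have h1 : (n + 1) % 2 = 1 := by omega
        have h2 : (n + 1) / 2 = n / 2 := by omega
        rw [hmod, h1, h2]
        norm_num
        push_cast [Nat.factorial_succ]; ring
      · -- n odd, n+1 even: m multiplied by n+1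
        obtain ⟨t, rfl⟩ : ∃ t, n = 2 * t + 1 := ⟨n / 2, by omega⟩
        have h1 : (2 * t + 1 + 1) % 2 = 0 := by omega
        have h2 : (2 * t + 1 + 1) / 2 = t + 1 := by omega
        have h3 : (2 * t + 1) / 2 = t := by omega
        rw [hmod, h1, h2, h3]
        norm_num
        constructor
        · push_cast [Nat.factorial_succ]; ring
        · push_cast [Nat.factorial_succ, pow_succ]; ring

-- the plain product loop computes n!.
lemma loopFact (n : Nat) :
    (PySem.List.pyRange 1 ((n : Int) + 1) 1).foldl (fun p i => p * i) (1 : Int)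
    = (n.factorial : Int) := by
  induction n with
  | zero => simp [PySem.List.pyRange_one_eq_nil]
  | succ n ih =>
      rw [show ((n + 1 : Nat) : Int) + 1 = ((n : Int) + 1) + 1 by push_cast; ring,
          PySem.List.pyRange_one_succ_right (by omega), List.foldl_append, ih]
      simp [Nat.factorial_succ]
      ring

-- ===== VERDICT (by name: the statement is the Claim_ definition above) =====
theorem func_spec : Claim_equal_func := by
  intro no _
  unfold Spec_func func func_alt
  by_cases hpos : no > 0
  · obtain ⟨n, rfl⟩ : ∃ n : Nat, no = (n : Int) := ⟨no.toNat, (Int.toNat_of_nonneg (by omega)).symm⟩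
    have hk : PySem.Int.floordiv (n : Int) 2 = ((n / 2 : Nat) : Int) := by
      exact_mod_cast PySem.Int.floordiv_natCast n 2
    simp only [hpos, if_pos, hk, loopA]
    have hp := loopFact (n / 2)
    have hsplit : PySem.List.pyRange 1 ((n : Int) + 1) 1
        = PySem.List.pyRange 1 (((n / 2 : Nat) : Int) + 1) 1
          ++ PySem.List.pyRange (((n / 2 : Nat) : Int) + 1) ((n : Int) + 1) 1 := by
      refine PySem.List.pyRange_one_append 1 (((n / 2 : Nat) : Int) + 1) ((n : Int) + 1)
        (by omega) (by have := Nat.div_le_self n 2; omega)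
    have hf : (PySem.List.pyRange (((n / 2 : Nat) : Int) + 1) ((n : Int) + 1) 1).foldl
        (fun f i => f * i) (((n / 2).factorial : Nat) : Int) = (n.factorial : Int) := by
      rw [← hp, ← List.foldl_append, ← hsplit, loopFact]
    rw [hp, hf]
    have hkn : ((n / 2 : Nat) : Int).toNat = n / 2 := by omega
    rw [hkn]
  · have h1 : PySem.List.pyRange 1 (no + 1) 1 = [] :=
      PySem.List.pyRange_one_eq_nil (by omega)
    rw [if_neg hpos]
    norm_num [h1, PySem.List.pyRange_one_eq_nil (le_refl (1:Int))]
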